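-- pv_equiv track=rewrite | github.com/andela-angene/Algorithmic-Problem-Solving | Hackerrank/algorithms - practice/warmup/birthday_cake_candles.py | cake_candles
-- ===== SOURCE A (Python) =====
-- def cake_candles(n, ar):
--     tallest = ar[0]
--     num = 1
--
--     for candle in ar[1:]:
--         if candle > tallest:
--             tallest = candle
--             num = 1
--         elif candle == tallest:
--             num += 1
--
--     return num
-- ===== SOURCE B (Python) =====
-- def cake_candles(n, ar):
--     s = sorted(ar)
--     return s.count(s[-1])
-- ===== Notes on version B (the rewrite author's own statement) =====
-- stated objective: simpler
-- what changed: Replaces the single-pass running-max-with-reset-counter loop by sorting a copy and counting occurrences of its last (largest) element.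
import Mathlib
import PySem

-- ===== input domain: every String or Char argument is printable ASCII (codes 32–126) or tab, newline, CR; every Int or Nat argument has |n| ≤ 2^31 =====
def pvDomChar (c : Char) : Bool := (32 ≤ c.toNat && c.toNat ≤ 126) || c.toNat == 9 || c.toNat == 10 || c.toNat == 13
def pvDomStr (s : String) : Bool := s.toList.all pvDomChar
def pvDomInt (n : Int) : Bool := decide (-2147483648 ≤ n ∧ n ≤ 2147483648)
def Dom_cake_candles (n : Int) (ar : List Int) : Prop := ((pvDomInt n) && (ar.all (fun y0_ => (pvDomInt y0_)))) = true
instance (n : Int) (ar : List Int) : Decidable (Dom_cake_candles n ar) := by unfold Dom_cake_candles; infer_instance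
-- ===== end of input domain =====

-- B replaces A's running-max/reset-counter loop by sorting a copy and counting its last
-- (largest) element: simpler to read, same return value on every nonempty list.

-- ===== PORT A =====
def cake_candles (n : Int) (ar : List Int) : Int :=
  let tallest := PySem.List.pyGetD ar 0 0
  let st := (PySem.List.slice ar (some 1) none).foldl
    (fun (s : Int × Int) candle =>
      if candle > s.1 then (candle, 1)
      else if candle = s.1 then (s.1, s.2 + 1)
      else s) (tallest, 1)
  st.2

-- ===== PORT B =====
def cake_candles_alt (n : Int) (ar : List Int) : Int :=
  let s := PySem.List.sorted ar (fun x => x) false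
  PySem.List.count s (PySem.List.pyGetD s (-1) 0)

-- ===== PRECONDITION & SPEC =====
-- Pre_ excludes exactly the empty list, on which A raises IndexError at ar[0] (B raises there too, at s[-1]).
def Pre_cake_candles (n : Int) (ar : List Int) : Prop := ar ≠ []
instance (n : Int) (ar : List Int) : Decidable (Pre_cake_candles n ar) := by unfold Pre_cake_candles; infer_instance
def pvWitness_cake_candles : Int × List Int := (4, [3, 2, 1, 3])

def Spec_cake_candles (n : Int) (ar : List Int) (out : Int) : Prop := out = cake_candles_alt n ar
instance (n : Int) (ar : List Int) (out : Int) : Decidable (Spec_cake_candles n ar out) := by unfold Spec_cake_candles; infer_instance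

-- ===== CLAIM (what is proved, stated in full; the proofs are below) =====
def Claim_equal_cake_candles : Prop := ∀ (n : Int) (ar : List Int), Dom_cake_candles n ar → Pre_cake_candles n ar → Spec_cake_candles n ar (cake_candles n ar)

-- ===== LEMMAS AND PROOFS =====

theorem foldl_max_is_max (a : Int) (rest : List Int) :
    a ≤ rest.foldl max a ∧ (∀ x ∈ rest, x ≤ rest.foldl max a) ∧ rest.foldl max a ∈ a :: rest := by
  induction rest generalizing a with
  | nil => simp
  | cons c rest ih =>
    obtain ⟨h1, h2, h3⟩ := ih (max a c)
    refine ⟨le_trans (le_max_left a c) h1, ?_, ?_⟩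
    · intro x hx
      rcases List.mem_cons.mp hx with rfl | hx'
      · exact le_trans (le_max_right a x) h1
      · exact h2 x hx'
    · simp only [List.foldl_cons]
      rcases List.mem_cons.mp h3 with hm | hm
      · rw [hm]
        rcases max_choice a c with h | h <;> simp [h]
      · simp [hm]

-- A's loop, started at (t, k): final max is foldl max, final count is k continued iff t stays maximal.
theorem cake_loop_spec (xs : List Int) (t k : Int) :
    xs.foldl (fun (s : Int × Int) candle =>
      if candle > s.1 then (candle, 1)
      else if candle = s.1 then (s.1, s.2 + 1)
      else s) (t, k)
    = (xs.foldl max t,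
       if xs.foldl max t = t then k + (xs.count (xs.foldl max t) : Int)
       else (xs.count (xs.foldl max t) : Int)) := by
  induction xs generalizing t k with
  | nil => simp
  | cons c rest ih =>
    have hub : t ≤ rest.foldl max t := (foldl_max_is_max t rest).1
    simp only [List.foldl_cons]
    rcases lt_trichotomy t c with h | h | h
    · have hmax : max t c = c := max_eq_right h.le
      rw [if_pos h, ih, hmax]
      have hcle : c ≤ rest.foldl max c := (foldl_max_is_max c rest).1
      have hne : rest.foldl max c ≠ t := by omega
      rw [if_neg hne]
      refine Prod.ext rfl ?_
      by_cases hc : rest.foldl max c = c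
      · rw [if_pos hc, List.count_cons, if_pos (by rw [hc]; exact beq_self_eq_true c)]
        push_cast; ring
      · rw [if_neg hc, List.count_cons,
            if_neg (by simpa using fun h' : c = rest.foldl max c => hc h'.symm)]
        push_cast; ring
    · subst h
      have h1 : ¬ (t > t) := lt_irrefl t
      rw [if_neg h1, if_pos rfl, ih, max_self]
      refine Prod.ext rfl ?_
      by_cases hc : rest.foldl max t = t
      · rw [if_pos hc, if_pos hc, List.count_cons, if_pos (by rw [hc]; exact beq_self_eq_true t)]
        push_cast; ring
      · rw [if_neg hc, if_neg hc, List.count_cons,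
            if_neg (by simpa using fun h' : t = rest.foldl max t => hc h'.symm)]
        push_cast; ring
    · have h1 : ¬ (c > t) := not_lt.mpr h.le
      have h2 : c ≠ t := ne_of_lt h
      rw [if_neg h1, if_neg h2, ih]
      rw [max_eq_left h.le]
      refine Prod.ext rfl ?_
      have hne' : rest.foldl max t ≠ c := by omega
      by_cases hc : rest.foldl max t = t
      · rw [if_pos hc, if_pos hc, List.count_cons,
            if_neg (by simpa using fun h' : c = rest.foldl max t => hne' h'.symm)]
        push_cast; ring
      · rw [if_neg hc, if_neg hc, List.count_cons,
            if_neg (by simpa using fun h' : c = rest.foldl max t => hne' h'.symm)]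
        push_cast; ring

-- In a ≤-sorted list every element is ≤ the last one.
theorem sorted_le_getLast (s : List Int) (hs : s.Pairwise (fun a b : Int => a ≤ b))
    (h : s ≠ []) : ∀ x ∈ s, x ≤ s.getLast h := by
  induction s with
  | nil => simp at h
  | cons a rest ih =>
    intro x hx
    by_cases hrne : rest = []
    · subst hrne
      have : x = a := by simpa using hx
      subst this
      simp [List.getLast_singleton]
    · rw [List.getLast_cons hrne]
      rcases List.mem_cons.mp hx with rfl | hx'
      · have hal : ∀ y ∈ rest, x ≤ y := (List.pairwise_cons.mp hs).1
        exact hal _ (List.getLast_mem hrne)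
      · exact ih (List.pairwise_cons.mp hs).2 hrne x hx'

-- ===== VERDICT (by name: the statement is the Claim_ definition above) =====
theorem cake_candles_spec : Claim_equal_cake_candles := by
  intro n ar _ hpre
  unfold Spec_cake_candles cake_candles cake_candles_alt
  obtain ⟨a, rest, rfl⟩ := List.exists_cons_of_ne_nil hpre
  simp only [PySem.List.slice_from_one, List.tail_cons, PySem.List.pyGetD_zero_cons]
  rw [cake_loop_spec]
  set s := PySem.List.sorted (a :: rest) (fun x => x) false with hsdef
  have hperm : s.Perm (a :: rest) := PySem.List.sorted_perm _ _ _
  have hsne : s ≠ [] := by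
    intro h; have := hperm.length_eq; rw [h] at this; simp at this
  rw [PySem.List.pyGetD_neg_one s 0 hsne, PySem.List.count_eq]
  set m := rest.foldl max a with hm
  obtain ⟨hma, hub, hmem⟩ := foldl_max_is_max a rest
  have hpw : s.Pairwise (fun a b : Int => a ≤ b) := PySem.List.sorted_pairwise _ _
  have hlmem : s.getLast hsne ∈ a :: rest := hperm.mem_iff.mp (List.getLast_mem hsne)
  have hlub : ∀ x ∈ a :: rest, x ≤ s.getLast hsne := by
    intro x hx
    exact sorted_le_getLast s hpw hsne x (hperm.mem_iff.mpr hx)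
  have heq : s.getLast hsne = m := by
    have h1 : s.getLast hsne ≤ m := by
      rcases List.mem_cons.mp hlmem with h | h
      · rw [h]; exact hma
      · exact hub _ h
    have h2 : m ≤ s.getLast hsne := hlub m hmem
    omega
  rw [heq, hperm.count_eq]
  by_cases hc : m = a
  · rw [if_pos hc, List.count_cons, if_pos (by rw [hc]; exact beq_self_eq_true a)]
    push_cast; ring
  · rw [if_neg hc, List.count_cons,
        if_neg (by simpa using fun h' : a = m => hc h'.symm)]
    push_cast; ring
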